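-- pv_equiv track=rewrite | github.com/galid1/Algorithm | python/baekjoon/2.algorithm/brute_force/16955.오목 이길 수 있을까?.py | check_r_diagonal
-- ===== SOURCE A (Python) =====
-- def check_r_diagonal(board, i, j):
--     # 우하향 대각선
--     cnt = 0
--     ni, nj = i, j
--     while True:
--         if not valid(ni - 1, nj - 1):
--             break
--
--         if board[ni - 1][nj - 1] != 'X':
--             break
--
--         cnt += 1
--         ni, nj = ni - 1, nj - 1
--
--     ni, nj = i, j
--     while True:
--         if not valid(ni + 1, nj + 1):
--             break
--
--         if board[ni + 1][nj + 1] != 'X':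
--             break
--
--         cnt += 1
--         ni, nj = ni + 1, nj + 1
--
--     return cnt >= 4
--
-- def valid(i, j):
--     return 0 <= i < 10 and 0 <= j < 10
-- ===== SOURCE B (Python) =====
-- def check_r_diagonal(board, i, j):
--     # mark each diagonal offset d in [-10, 10]: the center (d == 0) counts as 'X',
--     # out-of-bounds cells count as non-'X'
--     marks = [d == 0 or (0 <= i + d < 10 and 0 <= j + d < 10 and board[i + d][j + d] == 'X')
--              for d in range(-10, 11)]
--     # one linear pass: length of the contiguous run of marks containing the center (index 10)
--     length = 0
--     for k in range(21):
--         if marks[k]: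
--             length += 1
--         elif k < 10:
--             length = 0
--         else:
--             break
--     return length >= 5
-- ===== Notes on version B (the rewrite author's own statement) =====
-- stated objective: alternative
-- what changed: Replaces A's two outward while-loop scans (counting 'X' cells up-left and down-right of the center) with building the 21-entry mark vector of the whole diagonal segment (center forced to 'X', out-of-bounds cells non-'X') and one linear run-length pass returning whether the run containing the center has length >= 5.
-- outside the precondition, e.g. on check_r_diagonal([['O', 'X'], ['X', 'O']], 0, 0): A returns False, B raises IndexError
import Mathlib
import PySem

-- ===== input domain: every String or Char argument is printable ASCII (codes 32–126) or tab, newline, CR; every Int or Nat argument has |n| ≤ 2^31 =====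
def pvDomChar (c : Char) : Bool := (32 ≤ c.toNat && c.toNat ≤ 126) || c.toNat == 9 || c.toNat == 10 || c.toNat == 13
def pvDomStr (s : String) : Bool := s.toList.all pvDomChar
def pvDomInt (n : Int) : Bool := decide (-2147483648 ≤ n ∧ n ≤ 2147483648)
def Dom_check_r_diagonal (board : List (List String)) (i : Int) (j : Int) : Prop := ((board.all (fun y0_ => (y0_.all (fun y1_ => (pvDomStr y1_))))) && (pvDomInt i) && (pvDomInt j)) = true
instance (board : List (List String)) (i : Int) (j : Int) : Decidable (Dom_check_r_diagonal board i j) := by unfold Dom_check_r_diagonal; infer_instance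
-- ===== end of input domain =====

-- B replaces A's two outward while-loop scans by a 21-entry diagonal mark vector (center forced
-- to 'X') and one linear run-length pass through the center; same return value on Pre_, no speed claim.


-- ===== PORT A =====
-- board[a][b]; both programs only index with 0 ≤ a,b < 10, and Pre_ guarantees the cell exists,
-- so the `.getD` defaults are never reached on admitted inputs (pyGet? none = IndexError, excluded by Pre_)
def pyCell (board : List (List String)) (a b : Int) : String :=
  (PySem.List.pyGet? ((PySem.List.pyGet? board a).getD []) b).getD ""

def validAB (i j : Int) : Bool :=
  decide (0 ≤ i) && decide (i < 10) && decide (0 ≤ j) && decide (j < 10)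

-- first while loop; it runs at most 10 iterations (the scanned index must stay in [0,10)), so fuel 10 is exact
def upLoopA (board : List (List String)) : Nat → Int → Int → Int → Int
  | 0, _, _, cnt => cnt
  | fuel+1, ni, nj, cnt =>
    if validAB (ni - 1) (nj - 1) = false then cnt
    else if pyCell board (ni - 1) (nj - 1) ≠ "X" then cnt
    else upLoopA board fuel (ni - 1) (nj - 1) (cnt + 1)

-- second while loop, same bound
def downLoopA (board : List (List String)) : Nat → Int → Int → Int → Int
  | 0, _, _, cnt => cnt
  | fuel+1, ni, nj, cnt =>
    if validAB (ni + 1) (nj + 1) = false then cnt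
    else if pyCell board (ni + 1) (nj + 1) ≠ "X" then cnt
    else downLoopA board fuel (ni + 1) (nj + 1) (cnt + 1)

def check_r_diagonal (board : List (List String)) (i : Int) (j : Int) : Bool :=
  decide (downLoopA board 10 i j (upLoopA board 10 i j 0) ≥ 4)

-- ===== PORT B =====
-- the mark at position k (offset d = k - 10): center counts as 'X', out-of-bounds as non-'X'
def markB (board : List (List String)) (i j : Int) (k : Nat) : Bool :=
  let d : Int := (k : Int) - 10
  decide (d = 0) ||
    (decide (0 ≤ i + d) && decide (i + d < 10) && decide (0 ≤ j + d) && decide (j + d < 10)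
      && (pyCell board (i + d) (j + d) == "X"))

-- the `for k in range(21)` run-length pass with its early break
def runB (marks : List Bool) (k : Nat) (length : Int) : Int :=
  if k < 21 then
    if marks.getD k false then runB marks (k + 1) (length + 1)
    else if k < 10 then runB marks (k + 1) 0
    else length
  else length
termination_by 21 - k

def check_r_diagonal_alt (board : List (List String)) (i : Int) (j : Int) : Bool :=
  decide (runB ((List.range 21).map (markB board i j)) 0 0 ≥ 5)

-- ===== PRECONDITION & SPEC =====
-- Pre_ requires every in-bounds diagonal cell (offset d ≠ 0, 0 ≤ i+d,j+d < 10) to exist in the board;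
-- it excludes the crashes of both programs, and also inputs where a non-'X' cell lets A return before
-- reaching a missing cell while B (which reads the whole diagonal segment) raises IndexError there.
def Pre_check_r_diagonal (board : List (List String)) (i : Int) (j : Int) : Prop :=
  ∀ k ∈ List.range 21, ((k : Int) - 10 ≠ 0) →
    (0 ≤ i + ((k : Int) - 10)) → (i + ((k : Int) - 10) < 10) →
    (0 ≤ j + ((k : Int) - 10)) → (j + ((k : Int) - 10) < 10) →
    ((i + ((k : Int) - 10)).toNat < board.length ∧
     (j + ((k : Int) - 10)).toNat < (board.getD (i + ((k : Int) - 10)).toNat []).length)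
instance (board : List (List String)) (i : Int) (j : Int) : Decidable (Pre_check_r_diagonal board i j) := by unfold Pre_check_r_diagonal; infer_instance

def pvWitness_check_r_diagonal : List (List String) × Int × Int :=
  (List.replicate 10 (List.replicate 10 "."), 0, 0)

def Spec_check_r_diagonal (board : List (List String)) (i : Int) (j : Int) (out : Bool) : Prop := out = check_r_diagonal_alt board i j
instance (board : List (List String)) (i : Int) (j : Int) (out : Bool) : Decidable (Spec_check_r_diagonal board i j out) := by unfold Spec_check_r_diagonal; infer_instance

-- ===== CLAIM (what is proved, stated in full; the proofs are below) =====
def Claim_equal_check_r_diagonal : Prop := ∀ (board : List (List String)) (i : Int) (j : Int), Dom_check_r_diagonal board i j → Pre_check_r_diagonal board i j → Spec_check_r_diagonal board i j (check_r_diagonal board i j)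

-- ===== LEMMAS AND PROOFS =====

-- whether the diagonal cell at offset d is in bounds and holds 'X'
def gfun (board : List (List String)) (i j d : Int) : Bool :=
  validAB (i + d) (j + d) && (pyCell board (i + d) (j + d) == "X")

-- count of consecutive gfun-true offsets d-1, d-2, … (A's first loop, abstractly)
def cuF (board : List (List String)) (i j : Int) : Nat → Int → Int
  | 0, _ => 0
  | fuel+1, d => if gfun board i j (d - 1) then cuF board i j fuel (d - 1) + 1 else 0

-- count of consecutive gfun-true offsets d+1, d+2, … (A's second loop, abstractly)
def cdF (board : List (List String)) (i j : Int) : Nat → Int → Int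
  | 0, _ => 0
  | fuel+1, d => if gfun board i j (d + 1) then cdF board i j fuel (d + 1) + 1 else 0

-- run length of marks ending just before index k (B's `length` after k steps, when no break happened)
def lcB (board : List (List String)) (i j : Int) : Nat → Int
  | 0 => 0
  | k+1 => if markB board i j k then lcB board i j k + 1 else 0

-- count of consecutive true marks at indices k, k+1, … (fuel = 21 - k)
def rcB (board : List (List String)) (i j : Int) : Nat → Nat → Int
  | 0, _ => 0
  | t+1, k => if markB board i j k then rcB board i j t (k + 1) + 1 else 0

theorem gfun_split (board : List (List String)) (i j d : Int) :
    gfun board i j d = true ↔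
      (validAB (i + d) (j + d) = true ∧ pyCell board (i + d) (j + d) = "X") := by
  simp [gfun]

theorem up_eq (board : List (List String)) (i j : Int) :
    ∀ fuel (d cnt : Int), upLoopA board fuel (i + d) (j + d) cnt = cnt + cuF board i j fuel d := by
  intro fuel
  induction fuel with
  | zero => intro d cnt; simp [upLoopA, cuF]
  | succ f ih =>
    intro d cnt
    have hi : i + d - 1 = i + (d - 1) := by ring
    have hj : j + d - 1 = j + (d - 1) := by ring
    rw [upLoopA, cuF, hi, hj]
    by_cases hv : validAB (i + (d - 1)) (j + (d - 1)) = true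
    · by_cases hc : pyCell board (i + (d - 1)) (j + (d - 1)) = "X"
      · have hg : gfun board i j (d - 1) = true := (gfun_split board i j (d - 1)).2 ⟨hv, hc⟩
        simp [hv, hc, hg, ih (d - 1) (cnt + 1)]
        ring
      · have hg : gfun board i j (d - 1) = false := by
          rw [← Bool.not_eq_true]; intro h
          exact hc ((gfun_split board i j (d - 1)).1 h).2
        simp [hv, hc, hg]
    · have hg : gfun board i j (d - 1) = false := by
        rw [← Bool.not_eq_true]; intro h
        exact hv ((gfun_split board i j (d - 1)).1 h).1
      simp [Bool.not_eq_true] at hv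
      simp [hv, hg]

theorem down_eq (board : List (List String)) (i j : Int) :
    ∀ fuel (d cnt : Int), downLoopA board fuel (i + d) (j + d) cnt = cnt + cdF board i j fuel d := by
  intro fuel
  induction fuel with
  | zero => intro d cnt; simp [downLoopA, cdF]
  | succ f ih =>
    intro d cnt
    have hi : i + d + 1 = i + (d + 1) := by ring
    have hj : j + d + 1 = j + (d + 1) := by ring
    rw [downLoopA, cdF, hi, hj]
    by_cases hv : validAB (i + (d + 1)) (j + (d + 1)) = true
    · by_cases hc : pyCell board (i + (d + 1)) (j + (d + 1)) = "X"
      · have hg : gfun board i j (d + 1) = true := (gfun_split board i j (d + 1)).2 ⟨hv, hc⟩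
        simp [hv, hc, hg, ih (d + 1) (cnt + 1)]
        ring
      · have hg : gfun board i j (d + 1) = false := by
          rw [← Bool.not_eq_true]; intro h
          exact hc ((gfun_split board i j (d + 1)).1 h).2
        simp [hv, hc, hg]
    · have hg : gfun board i j (d + 1) = false := by
        rw [← Bool.not_eq_true]; intro h
        exact hv ((gfun_split board i j (d + 1)).1 h).1
      simp [Bool.not_eq_true] at hv
      simp [hv, hg]

theorem marks_getD (board : List (List String)) (i j : Int) (k : Nat) (hk : k < 21) :
    ((List.range 21).map (markB board i j)).getD k false = markB board i j k := by
  rw [List.getD_eq_getElem?_getD]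
  simp [hk]

theorem mark_eq_g (board : List (List String)) (i j : Int) (k : Nat) (hk : k ≠ 10) :
    markB board i j k = gfun board i j ((k : Int) - 10) := by
  have h0 : ¬ ((k : Int) - 10 = 0) := by omega
  simp [markB, gfun, validAB, h0, Bool.and_assoc]

theorem mark_ten (board : List (List String)) (i j : Int) :
    markB board i j 10 = true := by
  simp [markB]

theorem left_phase (board : List (List String)) (i j : Int)
    (marks : List Bool) (hm : marks = (List.range 21).map (markB board i j)) :
    ∀ t k, k + t = 10 → runB marks k (lcB board i j k) = runB marks 10 (lcB board i j 10) := by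
  intro t
  induction t with
  | zero =>
    intro k hk
    have hk' : k = 10 := by omega
    subst hk'
    rfl
  | succ t ih =>
    intro k hk
    have hk21 : k < 21 := by omega
    have hk10 : k < 10 := by omega
    rw [runB]
    simp only [hk21, if_pos, hm, marks_getD board i j k hk21]
    by_cases h : markB board i j k = true
    · rw [if_pos h]
      have : lcB board i j k + 1 = lcB board i j (k + 1) := by simp [lcB, h]
      rw [this, ← hm]; exact ih (k + 1) (by omega)
    · rw [if_neg h, if_pos hk10]
      have hlc : lcB board i j (k + 1) = (0 : Int) := by
        rw [lcB, if_neg h]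
      rw [← hlc, ← hm]; exact ih (k + 1) (by omega)

theorem lc_eq_cu (board : List (List String)) (i j : Int) :
    ∀ k, k ≤ 10 → lcB board i j k = cuF board i j k ((k : Int) - 10) := by
  intro k
  induction k with
  | zero => intro _; rfl
  | succ k ih =>
    intro hk
    have hk10 : k ≠ 10 := by omega
    have hd : ((k : Int) + 1) - 10 - 1 = (k : Int) - 10 := by ring
    rw [lcB, cuF]
    push_cast
    rw [hd, ← mark_eq_g board i j k hk10]
    by_cases h : markB board i j k = true
    · rw [if_pos h, if_pos h, ih (by omega)]
    · rw [if_neg h, if_neg h]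

theorem right_phase (board : List (List String)) (i j : Int)
    (marks : List Bool) (hm : marks = (List.range 21).map (markB board i j)) :
    ∀ t k (L : Int), k + t = 21 → 10 ≤ k → runB marks k L = L + rcB board i j t k := by
  intro t
  induction t with
  | zero =>
    intro k L hk _
    have : k = 21 := by omega
    subst this
    rw [runB]; simp [rcB]
  | succ t ih =>
    intro k L hk h10
    have hk21 : k < 21 := by omega
    rw [runB]
    simp only [hk21, if_pos, hm, marks_getD board i j k hk21]
    by_cases h : markB board i j k = true
    · rw [if_pos h, ← hm, ih (k + 1) (L + 1) (by omega) (by omega)]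
      rw [rcB, if_pos h]; ring
    · rw [if_neg h, if_neg (by omega : ¬ k < 10)]
      rw [rcB, if_neg h]; ring

theorem rc_eq_cd (board : List (List String)) (i j : Int) :
    ∀ t k, k + t = 21 → 11 ≤ k → rcB board i j t k = cdF board i j t ((k : Int) - 11) := by
  intro t
  induction t with
  | zero => intro k _ _; rfl
  | succ t ih =>
    intro k hk h11
    have hk10 : k ≠ 10 := by omega
    have hd : (k : Int) - 11 + 1 = (k : Int) - 10 := by ring
    rw [rcB, cdF, hd, ← mark_eq_g board i j k hk10]
    by_cases h : markB board i j k = true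
    · have : ((k : Int) - 10) = ((k + 1 : Nat) : Int) - 11 := by push_cast; ring
      rw [if_pos h, if_pos h, ih (k + 1) (by omega) (by omega), this]
    · rw [if_neg h, if_neg h]

theorem runB_value (board : List (List String)) (i j : Int) :
    runB ((List.range 21).map (markB board i j)) 0 0
      = cuF board i j 10 0 + 1 + cdF board i j 10 0 := by
  set marks := (List.range 21).map (markB board i j) with hm
  have hl : runB marks 0 0 = runB marks 10 (lcB board i j 10) :=
    left_phase board i j marks hm 10 0 (by omega)
  rw [hl, runB]
  simp only [(by omega : (10:Nat) < 21), if_pos, hm, marks_getD board i j 10 (by omega),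
    mark_ten board i j, if_pos]
  rw [← hm, right_phase board i j marks hm 10 11 _ (by omega) (by omega)]
  rw [rc_eq_cd board i j 10 11 (by omega) (by omega)]
  have h1 : lcB board i j 10 = cuF board i j 10 0 := by
    have := lc_eq_cu board i j 10 (by omega)
    simpa using this
  have h2 : ((11 : Nat) : Int) - 11 = 0 := by norm_num
  rw [h1, h2]

theorem a_value (board : List (List String)) (i j : Int) :
    downLoopA board 10 i j (upLoopA board 10 i j 0)
      = cuF board i j 10 0 + cdF board i j 10 0 := by
  have hu := up_eq board i j 10 0 0
  have hd := down_eq board i j 10 0 (cuF board i j 10 0)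
  simp only [add_zero, zero_add] at hu hd
  rw [hu, hd]

-- ===== VERDICT (by name: the statement is the Claim_ definition above) =====
theorem check_r_diagonal_spec : Claim_equal_check_r_diagonal := by
  intro board i j _ _
  unfold Spec_check_r_diagonal check_r_diagonal check_r_diagonal_alt
  rw [a_value board i j, runB_value board i j]
  simp only [decide_eq_decide]
  omega
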